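-- pv_equiv track=rewrite | github.com/JoArDiTo/sistemas-experto-peliculas | src/function.py | filtered_movies_by_duration
-- ===== SOURCE A (Python) =====
-- def filtered_movies_by_duration(duration, movies):
--     filtered_movies = []
--     for movie in movies:
--         for d in duration:
--             if d > 150 & movie['props']['duration'] > d:
--                 filtered_movies.append(movie)
--             else:
--                 if (d - 30) <= movie['props']['duration'] & movie['props']['duration'] <= (d + 30):
--                     filtered_movies.append(movie)
--     return filtered_movies
-- ===== SOURCE B (Python) =====
-- def _bisect_left(a, x):
--     lo, hi = 0, len(a)
--     while lo < hi:
--         mid = (lo + hi) // 2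
--         if a[mid] < x:
--             lo = mid + 1
--         else:
--             hi = mid
--     return lo
--
--
-- def _bisect_right(a, x):
--     lo, hi = 0, len(a)
--     while lo < hi:
--         mid = (lo + hi) // 2
--         if a[mid] <= x:
--             lo = mid + 1
--         else:
--             hi = mid
--     return lo
--
--
-- def filtered_movies_by_duration(duration, movies):
--     # A's first branch is always false (`&` binds tighter than the chained
--     # comparisons), so a movie is appended once per threshold d with
--     # d-30 <= md <= d+30; count that with two binary searches per movie.
--     if not duration:
--         return []
--     sorted_dur = sorted(duration)
--     result = []
--     for movie in movies:
--         md = movie['props']['duration']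
--         count = _bisect_right(sorted_dur, md + 30) - _bisect_left(sorted_dur, md - 30)
--         result.extend([movie] * count)
--     return result
-- ===== Notes on version B (the rewrite author's own statement) =====
-- stated objective: faster
-- what changed: A's nested movies x duration loop (whose first branch is unsatisfiable because & binds tighter than the chained comparisons) is replaced by sorting duration once and counting each movie's matching thresholds with two hand-written binary searches, emitting the movie that many times.
import Mathlib
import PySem

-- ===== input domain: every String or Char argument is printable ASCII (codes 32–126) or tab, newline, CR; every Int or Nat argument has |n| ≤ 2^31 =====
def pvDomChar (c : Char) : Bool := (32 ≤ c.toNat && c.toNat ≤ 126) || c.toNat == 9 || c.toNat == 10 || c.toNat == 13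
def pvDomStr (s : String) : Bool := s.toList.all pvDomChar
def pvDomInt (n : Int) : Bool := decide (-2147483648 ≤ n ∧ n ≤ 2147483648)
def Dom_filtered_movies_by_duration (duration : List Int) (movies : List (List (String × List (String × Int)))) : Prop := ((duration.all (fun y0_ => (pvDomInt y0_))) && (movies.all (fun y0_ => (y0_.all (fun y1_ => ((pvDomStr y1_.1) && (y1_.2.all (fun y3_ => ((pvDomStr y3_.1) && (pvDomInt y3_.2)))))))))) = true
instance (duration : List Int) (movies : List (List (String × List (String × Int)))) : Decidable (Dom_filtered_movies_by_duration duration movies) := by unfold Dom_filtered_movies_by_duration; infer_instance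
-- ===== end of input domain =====

-- B replaces A's quadratic movie×duration double loop by one sort of `duration` plus two
-- binary searches per movie (A's first branch is unsatisfiable, so only the per-movie
-- multiplicity of matching thresholds matters); objective: faster.

-- movie['props']['duration'] (exact on Pre_, which guarantees both keys are present)
def pvMd (movie : List (String × List (String × Int))) : Int :=
  (PySem.Dict.get? (PySem.Dict.mk ((PySem.Dict.get? (PySem.Dict.mk movie) "props").getD [])) "duration").getD 0

-- ===== PORT A =====
def filtered_movies_by_duration (duration : List Int) (movies : List (List (String × List (String × Int)))) : List (List (String × List (String × Int))) :=
  movies.foldl (fun filtered movie =>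
    duration.foldl (fun acc d =>
      -- `d > 150 & md > d` is the chained comparison d > (150 & md) > d
      if d > (Int.land 150 (pvMd movie)) ∧ (Int.land 150 (pvMd movie)) > d then acc ++ [movie]
      else
        -- `(d-30) <= md & md <= (d+30)` is the chained comparison (d-30) <= (md & md) <= (d+30)
        if (d - 30) ≤ Int.land (pvMd movie) (pvMd movie) ∧ Int.land (pvMd movie) (pvMd movie) ≤ (d + 30) then acc ++ [movie]
        else acc) filtered) []

-- ===== PORT B =====
-- Source B's hand-written _bisect_left/_bisect_right are exactly the bisect loop; ported as PySem's bisect loop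
def pvBL (a : List Int) (x : Int) : Nat := PySem.List.bisectLeft a x
def pvBR (a : List Int) (x : Int) : Nat := PySem.List.bisectRight a x

def filtered_movies_by_duration_alt (duration : List Int) (movies : List (List (String × List (String × Int)))) : List (List (String × List (String × Int))) :=
  if duration = [] then [] else
  let sortedDur := PySem.List.sorted duration (fun x => x) false
  movies.foldl (fun result movie =>
    let md := pvMd movie
    let count : Int := (pvBR sortedDur (md + 30) : Int) - (pvBL sortedDur (md - 30) : Int)
    result ++ List.replicate count.toNat movie) []

-- ===== PRECONDITION & SPEC =====
-- Pre_ excludes exactly the inputs where Python A raises KeyError: a nonempty `duration`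
-- together with some movie lacking the 'props' or nested 'duration' key.
def Pre_filtered_movies_by_duration (duration : List Int) (movies : List (List (String × List (String × Int)))) : Prop :=
  duration = [] ∨ ∀ movie ∈ movies,
    ((PySem.Dict.get? (PySem.Dict.mk movie) "props").bind
      (fun p => PySem.Dict.get? (PySem.Dict.mk p) "duration")).isSome = true
instance (duration : List Int) (movies : List (List (String × List (String × Int)))) : Decidable (Pre_filtered_movies_by_duration duration movies) := by unfold Pre_filtered_movies_by_duration; infer_instance

def pvWitness_filtered_movies_by_duration : List Int × (List (List (String × List (String × Int)))) :=
  ([100, 260], [[("props", [("duration", 95)])], [("props", [("duration", 10)])]])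

def Spec_filtered_movies_by_duration (duration : List Int) (movies : List (List (String × List (String × Int)))) (out : List (List (String × List (String × Int)))) : Prop := out = filtered_movies_by_duration_alt duration movies
instance (duration : List Int) (movies : List (List (String × List (String × Int)))) (out : List (List (String × List (String × Int)))) : Decidable (Spec_filtered_movies_by_duration duration movies out) := by unfold Spec_filtered_movies_by_duration; infer_instance

-- ===== CLAIM (what is proved, stated in full; the proofs are below) =====
def Claim_equal_filtered_movies_by_duration : Prop := ∀ (duration : List Int) (movies : List (List (String × List (String × Int)))), Dom_filtered_movies_by_duration duration movies → Pre_filtered_movies_by_duration duration movies → Spec_filtered_movies_by_duration duration movies (filtered_movies_by_duration duration movies)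

-- ===== LEMMAS AND PROOFS =====

theorem pv_land_self (m : Int) : Int.land m m = m := by
  cases m <;> simp [Int.land]

-- A's inner loop over `duration` appends `movie` once per threshold in the ±30 window
theorem pv_inner_A (duration : List Int) (movie : List (String × List (String × Int))) (acc : List (List (String × List (String × Int)))) :
    duration.foldl (fun acc d =>
      if d > (Int.land 150 (pvMd movie)) ∧ (Int.land 150 (pvMd movie)) > d then acc ++ [movie]
      else if (d - 30) ≤ Int.land (pvMd movie) (pvMd movie) ∧ Int.land (pvMd movie) (pvMd movie) ≤ (d + 30) then acc ++ [movie]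
      else acc) acc
    = acc ++ List.replicate (duration.countP (fun d => decide (pvMd movie - 30 ≤ d ∧ d ≤ pvMd movie + 30))) movie := by
  induction duration generalizing acc with
  | nil => simp
  | cons d ds ih =>
    have hl : Int.land (pvMd movie) (pvMd movie) = pvMd movie := pv_land_self _
    have h1 : ¬(d > (Int.land 150 (pvMd movie)) ∧ (Int.land 150 (pvMd movie)) > d) := by omega
    rw [List.foldl_cons, List.countP_cons, if_neg h1]
    by_cases h2 : (d - 30) ≤ Int.land (pvMd movie) (pvMd movie) ∧ Int.land (pvMd movie) (pvMd movie) ≤ (d + 30)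
    · rw [if_pos h2, ih]
      have hd : decide (pvMd movie - 30 ≤ d ∧ d ≤ pvMd movie + 30) = true := by
        simp only [decide_eq_true_eq]; omega
      rw [hd]
      simp [List.replicate_succ, List.append_assoc]
    · rw [if_neg h2, ih]
      have hd : decide (pvMd movie - 30 ≤ d ∧ d ≤ pvMd movie + 30) = false := by
        simp only [decide_eq_false_iff_not]; omega
      rw [hd]
      simp

-- counting a window of indices
theorem pv_countP_window (p : Int → Bool) (l : List Int) (L R : Nat) (hLR : L ≤ R) (hR : R ≤ l.length)
    (hlow : ∀ (j : Nat) (hj : j < l.length), j < L → p l[j] = false)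
    (hmid : ∀ (j : Nat) (hj : j < l.length), L ≤ j → j < R → p l[j] = true)
    (hhigh : ∀ (j : Nat) (hj : j < l.length), R ≤ j → p l[j] = false) :
    l.countP p = R - L := by
  have hsplit : l = l.take L ++ ((l.drop L).take (R - L) ++ l.drop R) := by
    have h1 : (l.drop L).take (R - L) ++ (l.drop L).drop (R - L) = l.drop L := List.take_append_drop _ _
    have h2 : (l.drop L).drop (R - L) = l.drop R := by
      rw [List.drop_drop]; congr 1; omega
    conv_rhs => rw [← h2, h1, List.take_append_drop]
  conv_lhs => rw [hsplit]
  rw [List.countP_append, List.countP_append]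
  have c1 : (l.take L).countP p = 0 := by
    rw [List.countP_eq_zero]
    intro a ha
    obtain ⟨i, hi, rfl⟩ := List.mem_iff_getElem.mp ha
    have hi' : i < L := by simp at hi; omega
    rw [List.getElem_take]
    simp [hlow i (by omega) hi']
  have c2 : ((l.drop L).take (R - L)).countP p = R - L := by
    have hall : ∀ a ∈ (l.drop L).take (R - L), p a = true := by
      intro a ha
      obtain ⟨i, hi, rfl⟩ := List.mem_iff_getElem.mp ha
      have hi' : i < R - L := by simp at hi; omega
      rw [List.getElem_take, List.getElem_drop]
      exact hmid (L + i) (by simp at hi ⊢; omega) (by omega) (by omega)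
    calc ((l.drop L).take (R - L)).countP p = ((l.drop L).take (R - L)).length := by
          rw [List.countP_eq_length]; exact hall
      _ = R - L := by simp; omega
  have c3 : (l.drop R).countP p = 0 := by
    rw [List.countP_eq_zero]
    intro a ha
    obtain ⟨i, hi, rfl⟩ := List.mem_iff_getElem.mp ha
    rw [List.getElem_drop]
    simp [hhigh (R + i) (by simp at hi; omega) (by omega)]
  omega

-- the two binary searches count exactly the thresholds in the ±30 window
theorem pv_bisect_count (l : List Int) (md : Int) (hs : l.Pairwise (· ≤ ·)) :
    ((pvBR l (md + 30) : Int) - (pvBL l (md - 30) : Int)).toNat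
      = l.countP (fun d => decide (md - 30 ≤ d ∧ d ≤ md + 30)) := by
  obtain ⟨hR1, hR2, hR3⟩ := PySem.List.bisectRight_spec l (md + 30) hs
  obtain ⟨hL1, hL2, hL3⟩ := PySem.List.bisectLeft_spec l (md - 30) hs
  set R := PySem.List.bisectRight l (md + 30) with hRdef
  set L := PySem.List.bisectLeft l (md - 30) with hLdef
  have hLR : L ≤ R := by
    by_contra hc
    have h : R < L := by omega
    have hRlen : R < l.length := lt_of_lt_of_le h hL1
    have := hL2 R hRlen h
    have := hR3 R hRlen (le_refl R)
    omega
  have hcount : l.countP (fun d => decide (md - 30 ≤ d ∧ d ≤ md + 30)) = R - L := by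
    apply pv_countP_window _ _ L R hLR hR1
    · intro j hj hjL
      have := hL2 j hj hjL
      simp only [decide_eq_false_iff_not]; omega
    · intro j hj hLj hjR
      have := hL3 j hj hLj
      have := hR2 j hj hjR
      simp only [decide_eq_true_eq]; omega
    · intro j hj hRj
      have := hR3 j hj hRj
      simp only [decide_eq_false_iff_not]; omega
  unfold pvBR pvBL
  rw [hcount]
  omega

theorem pv_foldl_ext {α β : Type} (f g : β → α → β) (l : List α) (a : β) (h : ∀ b x, f b x = g b x) :
    l.foldl f a = l.foldl g a := by
  induction l generalizing a with
  | nil => rfl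
  | cons x xs ih => simp only [List.foldl_cons, h]; exact ih _

-- ===== VERDICT (by name: the statement is the Claim_ definition above) =====
theorem filtered_movies_by_duration_spec : Claim_equal_filtered_movies_by_duration := by
  intro duration movies _ _
  unfold Spec_filtered_movies_by_duration
  unfold filtered_movies_by_duration filtered_movies_by_duration_alt
  by_cases hd : duration = []
  · subst hd
    rw [if_pos rfl]
    simp
  rw [if_neg hd]
  apply Eq.symm
  apply pv_foldl_ext
  intro acc movie
  have hs : (PySem.List.sorted duration (fun x => x) false).Pairwise (· ≤ ·) := by
    have := PySem.List.sorted_pairwise duration (fun x => x)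
    simpa using this
  have hperm : (PySem.List.sorted duration (fun x => x) false).Perm duration :=
    PySem.List.sorted_perm duration (fun x => x) false
  rw [pv_inner_A duration movie acc]
  show (acc ++ List.replicate (((pvBR (PySem.List.sorted duration (fun x => x) false) (pvMd movie + 30) : Int) - (pvBL (PySem.List.sorted duration (fun x => x) false) (pvMd movie - 30) : Int)).toNat) movie) = _
  rw [pv_bisect_count _ (pvMd movie) hs]
  rw [hperm.countP_eq]
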